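-- pv_equiv track=rewrite | github.com/Yehuda-Levy923/Project_Euler | Problems_1-100/Problems_90-99/Problem98.py | is_valid_mapping
-- ===== SOURCE A (Python) =====
-- def is_valid_mapping(word, square):
--     mapping, reverse = {}, {}
--     for w, s in zip(word, square):
--         if w in mapping and mapping[w] != s:
--             return None
--         if s in reverse and reverse[s] != w:
--             return None
--         mapping[w] = s
--         reverse[s] = w
--     return mapping
-- ===== SOURCE B (Python) =====
-- def is_valid_mapping(word, square):
--     pairs = set(zip(word, square))
--     if len({w for w, _ in pairs}) < len(pairs) or len({s for _, s in pairs}) < len(pairs):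
--         return None
--     return dict(zip(word, square))
-- ===== Notes on version B (the rewrite author's own statement) =====
-- stated objective: simpler
-- what changed: Replaces the incremental two-dict early-return loop by building the set of (letter,digit) pairs once and validating both directions with two set-cardinality comparisons, then returning dict(zip(word, square)).
import Mathlib
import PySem

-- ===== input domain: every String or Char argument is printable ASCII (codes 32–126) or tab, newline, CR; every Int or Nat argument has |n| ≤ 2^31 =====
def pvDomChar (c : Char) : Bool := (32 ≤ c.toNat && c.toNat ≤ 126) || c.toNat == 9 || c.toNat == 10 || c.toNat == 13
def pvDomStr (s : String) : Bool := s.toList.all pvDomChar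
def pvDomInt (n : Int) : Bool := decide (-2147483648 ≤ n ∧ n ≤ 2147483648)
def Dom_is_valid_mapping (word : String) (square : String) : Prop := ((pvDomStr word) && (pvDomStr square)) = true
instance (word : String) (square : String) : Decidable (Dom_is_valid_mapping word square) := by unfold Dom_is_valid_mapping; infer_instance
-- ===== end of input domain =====

-- B replaces A's incremental two-dict early-return loop by building the set of (letter,digit)
-- pairs once and validating both directions with two set-cardinality comparisons (objective: simpler).

-- ===== PORT A =====
-- the Python for-loop over zip(word, square) carrying the two dicts
def avmLoop : List (String × String) → PySem.Dict String String → PySem.Dict String String → Option (PySem.Dict String String)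
  | [], mapping, _ => some mapping
  | (w, s) :: rest, mapping, reverse =>
    -- if w in mapping and mapping[w] != s: return None
    if (match mapping.get? w with | some v => v != s | none => false) then none
    -- if s in reverse and reverse[s] != w: return None
    else if (match reverse.get? s with | some v => v != w | none => false) then none
    else avmLoop rest (mapping.insert w s) (reverse.insert s w)

def is_valid_mapping (word : String) (square : String) : Option (List (String × String)) :=
  -- zip over two strings yields pairs of 1-character strings
  ((avmLoop ((word.toList.zip square.toList).map (fun p => (String.singleton p.1, String.singleton p.2)))
      PySem.Dict.empty PySem.Dict.empty).map PySem.Dict.items)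

-- ===== PORT B =====
def is_valid_mapping_alt (word : String) (square : String) : Option (List (String × String)) :=
  let zl := (word.toList.zip square.toList).map (fun p => (String.singleton p.1, String.singleton p.2))
  let pairs : PySem.Set (String × String) := PySem.Set.ofList zl
  let ws : PySem.Set String := PySem.Set.ofList (pairs.map Prod.fst)
  let ss : PySem.Set String := PySem.Set.ofList (pairs.map Prod.snd)
  if PySem.Set.len ws < PySem.Set.len pairs || PySem.Set.len ss < PySem.Set.len pairs then none
  else some (PySem.Dict.ofList zl).items

-- ===== PRECONDITION & SPEC =====
def Spec_is_valid_mapping (word : String) (square : String) (out : Option (List (String × String))) : Prop := out = is_valid_mapping_alt word square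
instance (word : String) (square : String) (out : Option (List (String × String))) : Decidable (Spec_is_valid_mapping word square out) := by unfold Spec_is_valid_mapping; infer_instance

-- ===== CLAIM (what is proved, stated in full; the proofs are below) =====
def Claim_equal_is_valid_mapping : Prop := ∀ (word : String) (square : String), Dom_is_valid_mapping word square → Spec_is_valid_mapping word square (is_valid_mapping word square)

-- ===== LEMMAS AND PROOFS =====

-- a list of pairs is a consistent bijective mapping
def Good (L : List (String × String)) : Prop :=
  ∀ p ∈ L, ∀ q ∈ L, (p.1 = q.1 → p.2 = q.2) ∧ (p.2 = q.2 → p.1 = q.1)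

-- one pair passes A's two guard tests against the current dicts
def okPair (m r : PySem.Dict String String) (p : String × String) : Prop :=
  (∀ v, m.get? p.1 = some v → v = p.2) ∧ (∀ v, r.get? p.2 = some v → v = p.1)

def OkExt (m r : PySem.Dict String String) (L : List (String × String)) : Prop :=
  Good L ∧ ∀ p ∈ L, okPair m r p

def insFold (m : PySem.Dict String String) (L : List (String × String)) : PySem.Dict String String :=
  L.foldl (fun d p => d.insert p.1 p.2) m

theorem okExt_cons_iff (m r : PySem.Dict String String) (p : String × String)
    (rest : List (String × String)) (hok : okPair m r p) :
    OkExt m r (p :: rest) ↔ OkExt (m.insert p.1 p.2) (r.insert p.2 p.1) rest := by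
  constructor
  · rintro ⟨hg, hpl⟩
    refine ⟨fun x hx y hy => hg x (by simp [hx]) y (by simp [hy]), fun q hq => ?_⟩
    have hgq := hg p (by simp) q (by simp [hq])
    refine ⟨fun v hv => ?_, fun v hv => ?_⟩
    · rw [PySem.Dict.get?_insert] at hv
      by_cases h1 : q.1 = p.1
      · rw [if_pos h1] at hv
        cases hv
        exact hgq.1 h1.symm
      · rw [if_neg h1] at hv
        exact (hpl q (by simp [hq])).1 v hv
    · rw [PySem.Dict.get?_insert] at hv
      by_cases h2 : q.2 = p.2
      · rw [if_pos h2] at hv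
        cases hv
        exact hgq.2 h2.symm
      · rw [if_neg h2] at hv
        exact (hpl q (by simp [hq])).2 v hv
  · rintro ⟨hg, hpl⟩
    have hpq : ∀ q ∈ rest, (p.1 = q.1 → p.2 = q.2) ∧ (p.2 = q.2 → p.1 = q.1) := by
      intro q hq
      refine ⟨fun h1 => ?_, fun h2 => ?_⟩
      · exact (hpl q hq).1 p.2 (by rw [PySem.Dict.get?_insert, if_pos h1.symm])
      · exact (hpl q hq).2 p.1 (by rw [PySem.Dict.get?_insert, if_pos h2.symm])
    constructor
    · intro x hx y hy
      rcases List.mem_cons.mp hx with hx1 | hx1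
      · rcases List.mem_cons.mp hy with hy1 | hy1
        · subst hx1
          subst hy1
          exact ⟨fun _ => rfl, fun _ => rfl⟩
        · subst hx1
          exact hpq y hy1
      · rcases List.mem_cons.mp hy with hy1 | hy1
        · subst hy1
          have h := hpq x hx1
          exact ⟨fun h1 => (h.1 h1.symm).symm, fun h2 => (h.2 h2.symm).symm⟩
        · exact hg x hx1 y hy1
    · intro q hq
      rcases List.mem_cons.mp hq with hq1 | hq1
      · subst hq1
        exact hok
      · refine ⟨fun v hv => ?_, fun v hv => ?_⟩
        · by_cases h1 : q.1 = p.1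
          · have hv2 : v = p.2 := hok.1 v (h1 ▸ hv)
            have hq2 : q.2 = p.2 := ((hpq q hq1).1 h1.symm).symm
            rw [hv2, hq2]
          · exact (hpl q hq1).1 v (by rw [PySem.Dict.get?_insert, if_neg h1]; exact hv)
        · by_cases h2 : q.2 = p.2
          · have hv1 : v = p.1 := hok.2 v (h2 ▸ hv)
            have hq1' : q.1 = p.1 := ((hpq q hq1).2 h2.symm).symm
            rw [hv1, hq1']
          · exact (hpl q hq1).2 v (by rw [PySem.Dict.get?_insert, if_neg h2]; exact hv)

theorem avmLoop_eq_some (L : List (String × String)) :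
    ∀ m r : PySem.Dict String String, OkExt m r L → avmLoop L m r = some (insFold m L) := by
  induction L with
  | nil => intro m r _; rfl
  | cons p rest ih =>
    intro m r hok
    obtain ⟨w, s⟩ := p
    have hp := hok.2 (w, s) (by simp)
    have hc1 : (match m.get? w with | some v => v != s | none => false) = false := by
      rcases hm : m.get? w with _ | v
      · rfl
      · simpa using hp.1 v hm
    have hc2 : (match r.get? s with | some v => v != w | none => false) = false := by
      rcases hr : r.get? s with _ | v
      · rfl
      · simpa using hp.2 v hr
    show (if (match m.get? w with | some v => v != s | none => false) then none
          else if (match r.get? s with | some v => v != w | none => false) then none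
          else avmLoop rest (m.insert w s) (r.insert s w)) = _
    rw [hc1, hc2]
    simp only [Bool.false_eq_true, if_false]
    exact ih _ _ ((okExt_cons_iff m r (w, s) rest hp).mp hok)

theorem avmLoop_eq_none (L : List (String × String)) :
    ∀ m r : PySem.Dict String String, ¬ OkExt m r L → avmLoop L m r = none := by
  induction L with
  | nil =>
    intro m r hbad
    exact absurd ⟨fun p hp => absurd hp (List.not_mem_nil), fun p hp => absurd hp (List.not_mem_nil)⟩ hbad
  | cons p rest ih =>
    intro m r hbad
    obtain ⟨w, s⟩ := p
    show (if (match m.get? w with | some v => v != s | none => false) then none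
          else if (match r.get? s with | some v => v != w | none => false) then none
          else avmLoop rest (m.insert w s) (r.insert s w)) = _
    by_cases hc1 : (match m.get? w with | some v => v != s | none => false) = true
    · rw [if_pos hc1]
    · rw [if_neg hc1]
      by_cases hc2 : (match r.get? s with | some v => v != w | none => false) = true
      · rw [if_pos hc2]
      · rw [if_neg hc2]
        have hp : okPair m r (w, s) := by
          constructor
          · intro v hv
            rw [hv] at hc1
            simpa using hc1
          · intro v hv
            rw [hv] at hc2
            simpa using hc2
        exact ih _ _ (fun h => hbad ((okExt_cons_iff m r (w, s) rest hp).mpr h))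

theorem okExt_empty_iff (L : List (String × String)) :
    OkExt PySem.Dict.empty PySem.Dict.empty L ↔ Good L := by
  constructor
  · exact fun h => h.1
  · intro h
    exact ⟨h, fun p _ => ⟨fun v hv => by simp [PySem.Dict.get?_empty] at hv,
                          fun v hv => by simp [PySem.Dict.get?_empty] at hv⟩⟩

-- ofList xs is a sublist of xs
theorem ofList_sublist {α : Type} [BEq α] [LawfulBEq α] (xs : List α) :
    (PySem.Set.ofList xs).Sublist xs := by
  induction xs with
  | nil => simp [PySem.Set.ofList_nil]
  | cons x xs ih =>
    rw [PySem.Set.ofList_cons]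
    refine List.Sublist.cons₂ x (List.Sublist.trans ?_ ih)
    simp only [PySem.Set.discard]
    exact List.filter_sublist

theorem length_ofList_lt_of_not_nodup {α : Type} [BEq α] [LawfulBEq α] (xs : List α)
    (h : ¬ xs.Nodup) : (PySem.Set.ofList xs).length < xs.length := by
  rcases Nat.lt_or_ge (PySem.Set.ofList xs).length xs.length with hlt | hge
  · exact hlt
  · exfalso
    have hs := ofList_sublist xs
    have heq : PySem.Set.ofList xs = xs :=
      hs.eq_of_length (Nat.le_antisymm hs.length_le hge)
    exact h (heq ▸ PySem.Set.nodup_ofList xs)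

-- the set-cardinality test of B is Nodup of the projected list
theorem len_lt_iff {α β : Type} [BEq α] [LawfulBEq α] [BEq β] [LawfulBEq β]
    (P : List α) (f : α → β) :
    (PySem.Set.len (PySem.Set.ofList (P.map f)) < PySem.Set.len P ↔ ¬ (P.map f).Nodup) := by
  have hlen : (P.map f).length = P.length := by simp
  constructor
  · intro hlt hnd
    rw [PySem.Set.ofList_eq_self_of_nodup _ hnd] at hlt
    simp only [PySem.Set.len, hlen] at hlt
    omega
  · intro hnd
    have hlt := length_ofList_lt_of_not_nodup _ hnd
    simp only [PySem.Set.len]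
    omega

theorem good_iff_nodups (L : List (String × String)) :
    Good L ↔ ((PySem.Set.ofList L).map Prod.fst).Nodup ∧ ((PySem.Set.ofList L).map Prod.snd).Nodup := by
  have hnd := PySem.Set.nodup_ofList L
  rw [List.nodup_map_iff_inj_on hnd, List.nodup_map_iff_inj_on hnd]
  constructor
  · intro hg
    constructor
    · intro x hx y hy hf
      have h := hg x ((PySem.Set.mem_ofList _ _).mp hx) y ((PySem.Set.mem_ofList _ _).mp hy)
      exact Prod.ext hf (h.1 hf)
    · intro x hx y hy hf
      have h := hg x ((PySem.Set.mem_ofList _ _).mp hx) y ((PySem.Set.mem_ofList _ _).mp hy)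
      exact Prod.ext (h.2 hf) hf
  · rintro ⟨h1, h2⟩ p hp q hq
    have hp' : p ∈ PySem.Set.ofList L := (PySem.Set.mem_ofList _ _).mpr hp
    have hq' : q ∈ PySem.Set.ofList L := (PySem.Set.mem_ofList _ _).mpr hq
    exact ⟨fun h => congrArg Prod.snd (h1 p hp' q hq' h),
           fun h => congrArg Prod.fst (h2 p hp' q hq' h)⟩

-- ===== VERDICT (by name: the statement is the Claim_ definition above) =====
theorem is_valid_mapping_spec : Claim_equal_is_valid_mapping := by
  intro word square _
  unfold Spec_is_valid_mapping is_valid_mapping is_valid_mapping_alt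
  set L := (word.toList.zip square.toList).map (fun p => (String.singleton p.1, String.singleton p.2)) with hL
  by_cases hg : Good L
  · rw [avmLoop_eq_some L _ _ ((okExt_empty_iff L).mpr hg)]
    have hnd := (good_iff_nodups L).mp hg
    rw [if_neg (by
      simp only [Bool.or_eq_true, decide_eq_true_eq]
      rintro (h | h)
      · exact ((len_lt_iff _ _).mp h) hnd.1
      · exact ((len_lt_iff _ _).mp h) hnd.2)]
    rfl
  · rw [avmLoop_eq_none L _ _ (fun h => hg ((okExt_empty_iff L).mp h))]
    rw [if_pos (by
      simp only [Bool.or_eq_true, decide_eq_true_eq]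
      rw [good_iff_nodups] at hg
      by_cases h1 : ((PySem.Set.ofList L).map Prod.fst).Nodup
      · exact Or.inr ((len_lt_iff _ _).mpr (fun h2 => hg ⟨h1, h2⟩))
      · exact Or.inl ((len_lt_iff _ _).mpr h1))]
    rfl
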